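-- pv_equiv track=rewrite | github.com/nitin001singh/Data-Structure---Algorithm | Hashing/AmazonOA.py | getSuffixSum
-- ===== SOURCE A (Python) =====
-- def getSuffixSum(nums):
--     n = len(nums)
--     sSum = [0] * n
--     currentMax = nums[-1]
--     sSum[-1] = currentMax
--
--     for i in range(n - 2, -1, -1):
--         currentMax = max(nums[i], currentMax + nums[i])
--         sSum[i] = max(sSum[i+1], currentMax)
--
--     return sSum
-- ===== SOURCE B (Python) =====
-- def getSuffixSum(nums):
--     # Prefix-sum / max-difference algorithm: with S[k] = sum(nums[:k]),
--     # the answer for suffix i is max(S[r] - S[l] for i <= l < r <= n),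
--     # found in one backward scan keeping the running maximum of S.
--     S = [0]
--     for x in nums:
--         S.append(S[-1] + x)
--     res = [0] * len(nums)
--     hi = S[-1]
--     best = None
--     for l in range(len(nums) - 1, -1, -1):
--         cand = hi - S[l]
--         best = cand if best is None else max(best, cand)
--         hi = max(hi, S[l])
--         res[l] = best
--     return res
-- ===== Notes on version B (the rewrite author's own statement) =====
-- stated objective: alternative
-- what changed: A's backward Kadane recurrence currentMax = max(x, currentMax+x) with a fused suffix max is replaced by a prefix-sum max-difference algorithm: build prefix sums S, then the answer for suffix i is max(S[r]-S[l], i<=l<r<=n), computed in one backward scan keeping a running maximum of S.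
-- crash fix: On the empty list A raises IndexError (nums[-1]); B returns []. — e.g. on getSuffixSum([]): A raises IndexError, B returns []
import Mathlib
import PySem

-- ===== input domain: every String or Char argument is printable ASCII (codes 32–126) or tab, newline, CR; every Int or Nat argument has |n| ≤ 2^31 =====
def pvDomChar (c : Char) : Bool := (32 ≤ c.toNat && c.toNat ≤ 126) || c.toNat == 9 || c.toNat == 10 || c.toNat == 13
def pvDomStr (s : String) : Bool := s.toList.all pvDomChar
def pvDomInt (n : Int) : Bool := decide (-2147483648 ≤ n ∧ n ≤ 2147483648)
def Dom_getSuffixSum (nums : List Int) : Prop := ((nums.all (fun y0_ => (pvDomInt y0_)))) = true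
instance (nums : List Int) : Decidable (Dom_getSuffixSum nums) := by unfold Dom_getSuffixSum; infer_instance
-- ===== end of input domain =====

-- B replaces A's backward Kadane recurrence by a prefix-sum max-difference scan
-- (best subarray in a suffix = max S[r]-S[l] over prefix sums); objective: alternative.

-- ===== PORT A =====
-- the for-loop 'for i in range(n-2,-1,-1)': counter k = i+1 counts the remaining iterations
def pvLoopA (nums : List Int) : Nat → Int → List Int → List Int
  | 0, _, s => s
  | i + 1, cm, s =>
      let x := (PySem.List.pyGet? nums (i : Int)).getD 0
      let cm' := max x (cm + x)
      let s' := s.set i (max ((PySem.List.pyGet? s ((i : Int) + 1)).getD 0) cm')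
      pvLoopA nums i cm' s'

def getSuffixSum (nums : List Int) : List Int :=
  let n := nums.length
  let currentMax := (PySem.List.pyGet? nums (-1)).getD 0   -- nums[-1]; Pre_ excludes [] where Python raises
  let sSum := (List.replicate n (0 : Int)).set (n - 1) currentMax
  pvLoopA nums (n - 1) currentMax sSum

-- ===== PORT B =====
-- Source B's first loop: build the prefix-sum list S (appending S[-1] + x)
def pvLoopS : List Int → List Int → List Int
  | [], S => S
  | x :: rest, S => pvLoopS rest (S ++ [(PySem.List.pyGet? S (-1)).getD 0 + x])

-- Source B's backward loop: counter k = l + 1 counts the remaining iterations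
def pvLoopB (S : List Int) : Nat → Int → Option Int → List Int → List Int
  | 0, _, _, res => res
  | l + 1, hi, best, res =>
      let sl := (PySem.List.pyGet? S (l : Int)).getD 0
      let cand := hi - sl
      let best' := match best with | none => cand | some b => max b cand
      let hi' := max hi sl
      pvLoopB S l hi' (some best') (res.set l best')

def getSuffixSum_alt (nums : List Int) : List Int :=
  let S := pvLoopS nums [0]
  let res := List.replicate nums.length (0 : Int)
  let hi := (PySem.List.pyGet? S (-1)).getD 0
  pvLoopB S nums.length hi none res

-- ===== PRECONDITION & SPEC =====
-- A evaluates nums[-1]: it raises IndexError exactly on the empty list, which Pre_ excludes.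
def Pre_getSuffixSum (nums : List Int) : Prop := nums ≠ []
instance (nums : List Int) : Decidable (Pre_getSuffixSum nums) := by unfold Pre_getSuffixSum; infer_instance
def pvWitness_getSuffixSum : List Int := [1, -2, 3]

-- On the empty list A raises IndexError (nums[-1]); B returns [].
def Raises_getSuffixSum (nums : List Int) : Prop := nums = []
instance (nums : List Int) : Decidable (Raises_getSuffixSum nums) := by unfold Raises_getSuffixSum; infer_instance
def pvRaiseWitness_getSuffixSum : List Int := []
def pvRaiseWitnessOut_getSuffixSum : List Int := []

def Spec_getSuffixSum (nums : List Int) (out : List Int) : Prop := out = getSuffixSum_alt nums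
instance (nums : List Int) (out : List Int) : Decidable (Spec_getSuffixSum nums out) := by unfold Spec_getSuffixSum; infer_instance

-- ===== CLAIM (what is proved, stated in full; the proofs are below) =====
def Claim_equal_getSuffixSum : Prop := ∀ (nums : List Int), Dom_getSuffixSum nums → Pre_getSuffixSum nums → Spec_getSuffixSum nums (getSuffixSum nums)
def Claim_raises_getSuffixSum : Prop := (∀ (nums : List Int), Dom_getSuffixSum nums → Raises_getSuffixSum nums → ¬ Pre_getSuffixSum nums) ∧ (Dom_getSuffixSum (pvRaiseWitness_getSuffixSum) ∧ Raises_getSuffixSum (pvRaiseWitness_getSuffixSum) ∧ getSuffixSum_alt (pvRaiseWitness_getSuffixSum) = pvRaiseWitnessOut_getSuffixSum)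

-- ===== LEMMAS AND PROOFS =====

-- right-to-left scan, structurally on the list (proof-side characterisation of A's result)
def pvRScan (op : Int → Int → Int) : List Int → List Int
  | [] => []
  | x :: l =>
      match pvRScan op l with
      | [] => [x]
      | c :: r => op c x :: c :: r

theorem pvRScan_cons (op : Int → Int → Int) (x : Int) (suf : List Int) (c : Int) (r : List Int)
    (h : pvRScan op suf = c :: r) : pvRScan op (x :: suf) = op c x :: c :: r := by
  simp [pvRScan, h]

theorem pvLoopA_inv (pre suf : List Int) (c : Int) (r : List Int) (m : Int) (t : List Int)
    (h1 : pvRScan (fun c x => max x (c + x)) suf = c :: r)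
    (h2 : pvRScan (fun c s => max c s) (c :: r) = m :: t) :
    pvLoopA (pre ++ suf) pre.length c (List.replicate pre.length 0 ++ m :: t)
      = pvRScan (fun c s => max c s) (pvRScan (fun c x => max x (c + x)) (pre ++ suf)) := by
  induction pre using List.reverseRecOn generalizing suf c r m t with
  | nil => simpa [pvLoopA, h1] using h2.symm
  | append_singleton pre y ih =>
    have hassoc : (pre ++ [y]) ++ suf = pre ++ y :: suf := by simp
    have h1' : pvRScan (fun c x => max x (c + x)) (y :: suf) = max y (c + y) :: c :: r :=
      pvRScan_cons _ y suf c r h1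
    have h2' : pvRScan (fun c s => max c s) (max y (c + y) :: c :: r)
        = max m (max y (c + y)) :: m :: t := pvRScan_cons _ _ _ m t h2
    have hx : (PySem.List.pyGet? (pre ++ y :: suf) ((pre.length : Nat) : Int)).getD 0 = y := by
      rw [PySem.List.pyGet?_natCast]
      simp
    have hs : (PySem.List.pyGet? (List.replicate (pre.length + 1) (0 : Int) ++ m :: t)
        (((pre.length : Nat) : Int) + 1)).getD 0 = m := by
      rw [show ((pre.length : Nat) : Int) + 1 = (((pre.length + 1 : Nat)) : Int) by push_cast; ring,
        PySem.List.pyGet?_natCast]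
      simp
    have hset : (List.replicate (pre.length + 1) (0 : Int) ++ m :: t).set pre.length
          (max m (max y (c + y)))
        = List.replicate pre.length 0 ++ max m (max y (c + y)) :: m :: t := by
      rw [show List.replicate (pre.length + 1) (0 : Int) = List.replicate pre.length 0 ++ [0] by
        simp [List.replicate_succ']]
      rw [List.append_assoc, List.singleton_append]
      rw [show pre.length = (List.replicate pre.length (0 : Int)).length + 0 by simp]
      simp
    rw [hassoc, List.length_append, List.length_singleton]
    show pvLoopA (pre ++ y :: suf) (pre.length + 1) c
        (List.replicate (pre.length + 1) 0 ++ m :: t) = _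
    rw [pvLoopA]
    simp only [hx, hs, hset]
    exact ih (y :: suf) (max y (c + y)) (c :: r) (max m (max y (c + y))) (m :: t) h1' h2'

theorem getSuffixSum_eq_scan (nums : List Int) (h : nums ≠ []) :
    getSuffixSum nums = pvRScan (fun c s => max c s) (pvRScan (fun c x => max x (c + x)) nums) := by
  induction nums using List.reverseRecOn with
  | nil => exact absurd rfl h
  | append_singleton pre x _ =>
    have h1 : pvRScan (fun c x => max x (c + x)) [x] = x :: ([] : List Int) := by simp [pvRScan]
    have h2 : pvRScan (fun c s => max c s) (x :: ([] : List Int)) = x :: ([] : List Int) := by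
      simp [pvRScan]
    unfold getSuffixSum
    have hlen : (pre ++ [x]).length = pre.length + 1 := by simp
    have hcm : (PySem.List.pyGet? (pre ++ [x]) (-1)).getD 0 = x := by
      rw [PySem.List.pyGet?_neg_one_append_singleton]; rfl
    have hset : (List.replicate (pre.length + 1) (0 : Int)).set pre.length x
        = List.replicate pre.length 0 ++ x :: ([] : List Int) := by
      rw [show List.replicate (pre.length + 1) (0 : Int) = List.replicate pre.length 0 ++ [0] by
        simp [List.replicate_succ']]
      rw [show pre.length = (List.replicate pre.length (0 : Int)).length + 0 by simp]
      simp
    simp only [hlen, hcm, Nat.add_sub_cancel, hset]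
    exact pvLoopA_inv pre [x] x [] x [] h1 h2

-- proof-side prefix sums: pvPS s l = [s + sum of each nonempty prefix of l]
def pvPS (s : Int) : List Int → List Int
  | [] => []
  | x :: l => (s + x) :: pvPS (s + x) l

theorem pvPS_append (s : Int) (a b : List Int) :
    pvPS s (a ++ b) = pvPS s a ++ pvPS (s + a.sum) b := by
  induction a generalizing s with
  | nil => simp [pvPS]
  | cons x a ih => simp [pvPS, ih (s + x), add_assoc]

theorem pvLoopS_eq (nums : List Int) (acc : List Int) (s : Int) :
    pvLoopS nums (acc ++ [s]) = acc ++ s :: pvPS s nums := by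
  induction nums generalizing acc s with
  | nil => rfl
  | cons x rest ih =>
    show pvLoopS rest ((acc ++ [s]) ++ [(PySem.List.pyGet? (acc ++ [s]) (-1)).getD 0 + x]) = _
    rw [PySem.List.pyGet?_neg_one_append_singleton]
    have := ih (acc ++ [s]) (s + x)
    simpa [pvPS] using this

theorem pvS_get (pre suf : List Int) (s : Int) :
    (s :: pvPS s (pre ++ suf))[pre.length]? = some (s + pre.sum) := by
  induction pre generalizing s with
  | nil => simp
  | cons p pre ih =>
    show ((s + p) :: pvPS (s + p) (pre ++ suf))[pre.length]? = _
    rw [ih (s + p)]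
    simp [add_assoc]

theorem kadane_step (y c : Int) : max y (c + y) = y + max 0 c := by omega

theorem pvLoopB_inv (pre suf : List Int) (c : Int) (r : List Int) (m : Int) (t : List Int)
    (h1 : pvRScan (fun c x => max x (c + x)) suf = c :: r)
    (h2 : pvRScan (fun c s => max c s) (c :: r) = m :: t) :
    pvLoopB (0 :: pvPS 0 (pre ++ suf)) pre.length (pre.sum + max 0 c) (some m)
        (List.replicate pre.length 0 ++ m :: t)
      = pvRScan (fun c s => max c s) (pvRScan (fun c x => max x (c + x)) (pre ++ suf)) := by
  induction pre using List.reverseRecOn generalizing suf c r m t with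
  | nil => simpa [pvLoopB, h1] using h2.symm
  | append_singleton pre y ih =>
    have hassoc : (pre ++ [y]) ++ suf = pre ++ y :: suf := by simp
    have h1' : pvRScan (fun c x => max x (c + x)) (y :: suf) = max y (c + y) :: c :: r :=
      pvRScan_cons _ y suf c r h1
    have h2' : pvRScan (fun c s => max c s) (max y (c + y) :: c :: r)
        = max m (max y (c + y)) :: m :: t := pvRScan_cons _ _ _ m t h2
    have hsl : (PySem.List.pyGet? (0 :: pvPS 0 (pre ++ y :: suf)) ((pre.length : Nat) : Int)).getD 0
        = pre.sum := by
      rw [PySem.List.pyGet?_natCast]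
      simp [pvS_get pre (y :: suf) 0]
    have hset : (List.replicate (pre.length + 1) (0 : Int) ++ m :: t).set pre.length
          (max m (max y (c + y)))
        = List.replicate pre.length 0 ++ max m (max y (c + y)) :: m :: t := by
      rw [show List.replicate (pre.length + 1) (0 : Int) = List.replicate pre.length 0 ++ [0] by
        simp [List.replicate_succ']]
      rw [List.append_assoc, List.singleton_append]
      rw [show pre.length = (List.replicate pre.length (0 : Int)).length + 0 by simp]
      simp
    have hcand : (pre ++ [y]).sum + max 0 c - pre.sum = max y (c + y) := by
      rw [kadane_step]; simp; ring
    have hhi : max ((pre ++ [y]).sum + max 0 c) pre.sum = pre.sum + max 0 (max y (c + y)) := by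
      simp only [List.sum_append, List.sum_cons, List.sum_nil, add_zero]
      omega
    rw [hassoc, List.length_append, List.length_singleton]
    show pvLoopB (0 :: pvPS 0 (pre ++ y :: suf)) (pre.length + 1) ((pre ++ [y]).sum + max 0 c)
        (some m) (List.replicate (pre.length + 1) 0 ++ m :: t) = _
    rw [pvLoopB]
    simp only [hsl, hcand, hhi, hset]
    exact ih (y :: suf) (max y (c + y)) (c :: r) (max m (max y (c + y))) (m :: t) h1' h2'

theorem getSuffixSum_alt_eq_scan (nums : List Int) (h : nums ≠ []) :
    getSuffixSum_alt nums
      = pvRScan (fun c s => max c s) (pvRScan (fun c x => max x (c + x)) nums) := by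
  induction nums using List.reverseRecOn with
  | nil => exact absurd rfl h
  | append_singleton pre x _ =>
    have h1 : pvRScan (fun c x => max x (c + x)) [x] = x :: ([] : List Int) := by simp [pvRScan]
    have h2 : pvRScan (fun c s => max c s) (x :: ([] : List Int)) = x :: ([] : List Int) := by
      simp [pvRScan]
    unfold getSuffixSum_alt
    have hS : pvLoopS (pre ++ [x]) [0] = (0 : Int) :: pvPS 0 (pre ++ [x]) := by
      simpa using pvLoopS_eq (pre ++ [x]) [] 0
    have hS' : (0 : Int) :: pvPS 0 (pre ++ [x]) = ((0 : Int) :: pvPS 0 pre) ++ [pre.sum + x] := by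
      rw [pvPS_append]; simp [pvPS]
    have hhi : (PySem.List.pyGet? (((0 : Int) :: pvPS 0 pre) ++ [pre.sum + x]) (-1)).getD 0
        = pre.sum + x := by
      rw [PySem.List.pyGet?_neg_one_append_singleton]; rfl
    have hsl : (PySem.List.pyGet? ((0 : Int) :: pvPS 0 (pre ++ [x]))
        ((pre.length : Nat) : Int)).getD 0 = pre.sum := by
      rw [PySem.List.pyGet?_natCast]
      simp [pvS_get pre [x] 0]
    have hset : (List.replicate (pre.length + 1) (0 : Int)).set pre.length x
        = List.replicate pre.length 0 ++ x :: ([] : List Int) := by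
      rw [show List.replicate (pre.length + 1) (0 : Int) = List.replicate pre.length 0 ++ [0] by
        simp [List.replicate_succ']]
      rw [show pre.length = (List.replicate pre.length (0 : Int)).length + 0 by simp]
      simp
    have hcand : pre.sum + x - pre.sum = x := by ring
    have hhi' : max (pre.sum + x) pre.sum = pre.sum + max 0 x := by omega
    rw [hS, hS']
    show pvLoopB ((0 : Int) :: pvPS 0 pre ++ [pre.sum + x]) (pre ++ [x]).length
        ((PySem.List.pyGet? ((0 : Int) :: pvPS 0 pre ++ [pre.sum + x]) (-1)).getD 0) none
        (List.replicate (pre ++ [x]).length 0)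
      = pvRScan (fun c s => max c s) (pvRScan (fun c x => max x (c + x)) (pre ++ [x]))
    rw [hhi, show ((0 : Int) :: pvPS 0 pre ++ [pre.sum + x]) = (0 : Int) :: pvPS 0 (pre ++ [x]) from hS'.symm]
    rw [show (pre ++ [x]).length = pre.length + 1 by simp]
    rw [pvLoopB]
    simp only [hsl, hcand, hhi', hset]
    exact pvLoopB_inv pre [x] x [] x [] h1 h2

-- ===== VERDICT (by name: the statement is the Claim_ definition above) =====
theorem getSuffixSum_spec : Claim_equal_getSuffixSum := by
  intro nums _ hpre
  unfold Spec_getSuffixSum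
  rw [getSuffixSum_eq_scan nums hpre, getSuffixSum_alt_eq_scan nums hpre]

def getSuffixSum_raises : Claim_raises_getSuffixSum := by
  unfold Claim_raises_getSuffixSum
  exact ⟨fun nums _ hr => by simp [Raises_getSuffixSum] at hr; simp [Pre_getSuffixSum, hr], by decide⟩
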